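-- pv_equiv track=rewrite | github.com/JuanNicolasRomeroOrtegon/Reto-01 | 5) Return Same Characters.py | return_words
-- ===== SOURCE A (Python) =====
-- def sort_characters(original_list: list[str]) -> list[list[str]]:
--     return [sorted(word) for word in original_list]
--
-- def words_with_the_same_characters(sorted_letters: list[list[str]]) -> list[str]:
--     same_characters: list[list[str]]
--
--     same_characters = []
--     for x in range(len(sorted_letters) - 1):
--         #We compare each word
--         for y in range(x + 1, len(sorted_letters)):
--             # We do this to avoid repetitions:
--             if sorted_letters[x] == sorted_letters[y] and (
--             sorted_letters[x] not in same_characters):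
--                 same_characters.append(sorted_letters[x])
--
--     return same_characters
--
-- def return_words(original_list: list[str]) -> list[str]:
--     same_words: list
--
--     sorted_letters = sort_characters(original_list)
--     same_characters = words_with_the_same_characters(sorted_letters)
--
--     same_words = []
--     for x in range(len(same_characters)):
--         for w in range(len(sorted_letters)):
--             if same_characters[x] == sorted_letters[w]:
--                 same_words.append(original_list[w])
--
--     return same_words
-- ===== SOURCE B (Python) =====
-- def return_words(original_list: list[str]) -> list[str]:
--     groups: dict[str, list[str]] = {}
--     for word in original_list:
--         groups.setdefault("".join(sorted(word)), []).append(word)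
--     return [word for group in groups.values() if len(group) >= 2 for word in group]
-- ===== Notes on version B (the rewrite author's own statement) =====
-- stated objective: faster
-- what changed: Replaced A's three passes with quadratic pairwise comparison of sorted-letter lists (plus a rescan per duplicate signature) by a single dict pass grouping words under their sorted-letter signature, emitting groups of size >= 2 in first-occurrence order.
import Mathlib
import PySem

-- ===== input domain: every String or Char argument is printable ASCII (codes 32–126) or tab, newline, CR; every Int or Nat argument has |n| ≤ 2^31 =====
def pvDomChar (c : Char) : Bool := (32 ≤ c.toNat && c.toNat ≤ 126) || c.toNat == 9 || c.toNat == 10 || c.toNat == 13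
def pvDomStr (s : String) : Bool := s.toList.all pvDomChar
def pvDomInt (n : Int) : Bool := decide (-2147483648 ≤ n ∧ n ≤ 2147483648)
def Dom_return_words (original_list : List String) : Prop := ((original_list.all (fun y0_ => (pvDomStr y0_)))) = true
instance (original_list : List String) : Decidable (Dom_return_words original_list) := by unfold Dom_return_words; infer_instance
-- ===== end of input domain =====

-- B replaces A's O(n^2) pairwise signature comparison by a single dict grouping on the
-- sorted-letter signature, emitting the groups with at least two members (objective: faster).

-- ===== PORT A =====
-- sorted(word): a Python string sorts to a list of its characters
def sort_characters (original_list : List String) : List (List Char) :=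
  original_list.map (fun word => PySem.List.sorted word.toList (fun c => c) false)

-- the loops run over nonnegative index ranges range(a, b): ported as List.range / List.range';
-- xs[i] with i always in range: ported as getD (exact there)
def words_with_the_same_characters (sorted_letters : List (List Char)) : List (List Char) :=
  (List.range (sorted_letters.length - 1)).foldl (fun same_characters x =>
    (List.range' (x + 1) (sorted_letters.length - (x + 1))).foldl (fun same_characters y =>
      if sorted_letters.getD x [] = sorted_letters.getD y [] ∧
          sorted_letters.getD x [] ∉ same_characters then
        same_characters ++ [sorted_letters.getD x []]
      else same_characters) same_characters) []

def return_words (original_list : List String) : List String :=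
  let sorted_letters := sort_characters original_list
  let same_characters := words_with_the_same_characters sorted_letters
  (List.range same_characters.length).foldl (fun same_words x =>
    (List.range sorted_letters.length).foldl (fun same_words w =>
      if same_characters.getD x [] = sorted_letters.getD w [] then
        same_words ++ [original_list.getD w ""]
      else same_words) same_words) []

-- ===== PORT B =====
-- "".join(sorted(word)): the sorted characters of word, as a String
def pvSig (word : String) : String :=
  String.ofList (PySem.List.sorted word.toList (fun c => c) false)

def return_words_alt (original_list : List String) : List String :=
  -- groups.setdefault(sig, []).append(word)  =  modify sig [] (· ++ [word])
  let groups : PySem.Dict String (List String) :=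
    original_list.foldl (fun groups word =>
      groups.modify (pvSig word) [] (fun g => g ++ [word])) PySem.Dict.empty
  (((PySem.Dict.values groups).filter (fun group => 2 ≤ group.length)).flatten)

-- ===== PRECONDITION & SPEC =====
def Spec_return_words (original_list : List String) (out : List String) : Prop := out = return_words_alt original_list
instance (original_list : List String) (out : List String) : Decidable (Spec_return_words original_list out) := by unfold Spec_return_words; infer_instance

-- ===== CLAIM (what is proved, stated in full; the proofs are below) =====
def Claim_equal_return_words : Prop := ∀ (original_list : List String), Dom_return_words original_list → Spec_return_words original_list (return_words original_list)

-- ===== LEMMAS AND PROOFS =====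

-- A's signature of a word, as a character list
def pvSigL (word : String) : List Char := PySem.List.sorted word.toList (fun c => c) false

theorem pvSig_eq (w : String) : pvSig w = String.ofList (pvSigL w) := rfl

-- the inner duplicate-search loop of words_with_the_same_characters appends s once
-- iff some scanned index carries s and s is not yet present
theorem inner_dup_loop (sl : List (List Char)) (s : List Char) (ys : List Nat) (acc : List (List Char)) :
    ys.foldl (fun acc y => if s = sl.getD y [] ∧ s ∉ acc then acc ++ [s] else acc) acc
      = if (∃ y ∈ ys, s = sl.getD y []) ∧ s ∉ acc then acc ++ [s] else acc := by
  induction ys generalizing acc with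
  | nil => simp
  | cons y ys ih =>
    simp only [List.foldl_cons]
    by_cases hs : s ∈ acc
    · rw [if_neg (by tauto), ih, if_neg (by tauto), if_neg (by tauto)]
    · by_cases hy : s = sl.getD y []
      · rw [if_pos ⟨hy, hs⟩, ih, if_neg (by simp), if_pos ⟨⟨y, by simp, hy⟩, hs⟩]
      · rw [if_neg (by tauto), ih]
        by_cases hex : ∃ y' ∈ ys, s = sl.getD y' []
        · rw [if_pos ⟨hex, hs⟩,
            if_pos ⟨by obtain ⟨y', h1, h2⟩ := hex; exact ⟨y', by simp [h1], h2⟩, hs⟩]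
        · rw [if_neg (fun h => hex h.1), if_neg ?_]
          rintro ⟨⟨y', hy', h2⟩, -⟩
          simp only [List.mem_cons] at hy'
          rcases hy' with h | h
          · exact hy (h ▸ h2)
          · exact hex ⟨y', h, h2⟩

-- scanning indices a..length-1 via getD sees exactly the members of drop a
theorem exists_range'_getD (sl : List (List Char)) (a : Nat) (s : List Char) (ha : a ≤ sl.length) :
    (∃ y ∈ List.range' a (sl.length - a), s = sl.getD y []) ↔ s ∈ sl.drop a := by
  constructor
  · rintro ⟨y, hy, rfl⟩
    rw [List.mem_range'_1] at hy
    have hlt : y < sl.length := by omega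
    rw [List.getD_eq_getElem _ _ hlt]
    have hidx : y - a < (sl.drop a).length := by simp; omega
    refine List.mem_iff_getElem.2 ⟨y - a, hidx, ?_⟩
    rw [List.getElem_drop]
    congr 1; omega
  · intro hmem
    obtain ⟨i, hi, hval⟩ := List.mem_iff_getElem.1 hmem
    rw [List.getElem_drop] at hval
    have hi' : a + i < sl.length := by simp at hi; omega
    refine ⟨a + i, List.mem_range'_1.2 ⟨by omega, by omega⟩, ?_⟩
    rw [List.getD_eq_getElem _ _ hi', hval]

theorem set_ofList_append_singleton {α : Type} [BEq α] [LawfulBEq α] (t : List α) (e : α) :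
    PySem.Set.ofList (t ++ [e])
      = if e ∈ t then PySem.Set.ofList t else PySem.Set.ofList t ++ [e] := by
  rw [PySem.Set.ofList_eq_foldl, List.foldl_append, ← PySem.Set.ofList_eq_foldl]
  simp only [List.foldl_cons, List.foldl_nil]
  unfold PySem.Set.add PySem.Set.contains
  by_cases h : e ∈ t
  · simp [h, PySem.Set.mem_ofList]
  · simp [h, PySem.Set.mem_ofList]

-- the outer loop of words_with_the_same_characters up to k builds, in first-occurrence
-- order, the distinct signatures among the first k entries that occur at least twice in sl
theorem outer_dup_loop (sl : List (List Char)) (k : Nat) (hk : k ≤ sl.length) :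
    (List.range k).foldl (fun same_characters x =>
      (List.range' (x + 1) (sl.length - (x + 1))).foldl (fun same_characters y =>
        if sl.getD x [] = sl.getD y [] ∧ sl.getD x [] ∉ same_characters then
          same_characters ++ [sl.getD x []]
        else same_characters) same_characters) []
      = (PySem.Set.ofList (sl.take k)).filter (fun s => 2 ≤ sl.count s) := by
  induction k with
  | zero => simp [PySem.Set.ofList]
  | succ k ih =>
    have hk' : k < sl.length := by omega
    rw [List.range_succ, List.foldl_append, ih (by omega), List.foldl_cons, List.foldl_nil]
    set e := sl.getD k [] with he
    have heElem : e = sl[k] := List.getD_eq_getElem _ _ hk'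
    set acc := (PySem.Set.ofList (sl.take k)).filter (fun s => 2 ≤ sl.count s) with hacc
    have hmemacc : ∀ t, t ∈ acc ↔ t ∈ sl.take k ∧ 2 ≤ sl.count t := by
      intro t
      simp [hacc, List.mem_filter, PySem.Set.mem_ofList]
    have hdecomp : sl = sl.take k ++ e :: sl.drop (k + 1) := by
      rw [heElem]
      conv_lhs => rw [← List.take_append_drop k sl]
      rw [List.drop_eq_getElem_cons hk']
    rw [inner_dup_loop]
    simp only [exists_range'_getD sl (k + 1) e (by omega)]
    rw [List.take_succ_eq_append_getElem hk', ← heElem, set_ofList_append_singleton]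
    by_cases htk : e ∈ sl.take k
    · -- e already seen earlier: it has count ≥ 2 and is already in acc; no change on either side
      have hc2 : 2 ≤ sl.count e := by
        have h1 : 0 < (sl.take k).count e := List.count_pos_iff.2 htk
        have h2 : sl.count e = (sl.take k).count e + (e :: sl.drop (k + 1)).count e := by
          conv_lhs => rw [hdecomp]
          rw [List.count_append]
        rw [h2, List.count_cons_self]
        omega
      rw [if_neg (fun h => h.2 ((hmemacc e).2 ⟨htk, hc2⟩)), if_pos htk]
    · rw [if_neg htk]
      have hsnacc : e ∉ acc := fun h => htk ((hmemacc e).1 h).1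
      by_cases hdrop : e ∈ sl.drop (k + 1)
      · -- first of at least two occurrences: appended on both sides
        have hc2 : 2 ≤ sl.count e := by
          have h1 : 0 < (sl.drop (k + 1)).count e := List.count_pos_iff.2 hdrop
          have h2 : sl.count e = (sl.take k).count e + (e :: sl.drop (k + 1)).count e := by
            conv_lhs => rw [hdecomp]
            rw [List.count_append]
          rw [h2, List.count_cons_self]
          omega
        rw [if_pos ⟨hdrop, hsnacc⟩, List.filter_append]
        simp [hc2]
        exact hacc
      · -- the only occurrence: count 1, dropped by both sides
        have hc1 : sl.count e = 1 := by
          conv_lhs => rw [hdecomp]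
          rw [List.count_append, List.count_cons_self,
            List.count_eq_zero_of_not_mem htk, List.count_eq_zero_of_not_mem hdrop]
        rw [if_neg (by tauto), List.filter_append]
        simp [hc1]
        exact hacc

-- the full middle pass: distinct signatures with at least two occurrences, in
-- first-occurrence order
theorem words_with_the_same_characters_eq (sl : List (List Char)) :
    words_with_the_same_characters sl
      = (PySem.Set.ofList sl).filter (fun s => 2 ≤ sl.count s) := by
  unfold words_with_the_same_characters
  rw [outer_dup_loop sl (sl.length - 1) (by omega)]
  rcases Nat.eq_zero_or_pos sl.length with h0 | hpos
  · rw [List.eq_nil_of_length_eq_zero h0]; simp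
  · have hk' : sl.length - 1 < sl.length := by omega
    set e := sl[sl.length - 1] with he
    set t := sl.take (sl.length - 1) with ht
    have hsl : sl = t ++ [e] := by
      conv_lhs => rw [← List.take_append_drop (sl.length - 1) sl]
      rw [List.drop_eq_getElem_cons hk', ← he, ← ht,
        List.drop_eq_nil_of_le (by omega)]
    rw [show PySem.Set.ofList sl
        = if e ∈ t then PySem.Set.ofList t else PySem.Set.ofList t ++ [e] from by
      conv_lhs => rw [hsl]
      exact set_ofList_append_singleton t e]
    by_cases htk : e ∈ t
    · rw [if_pos htk]
    · rw [if_neg htk, List.filter_append]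
      have hc1 : sl.count e = 1 := by
        conv_lhs => rw [hsl]
        rw [List.count_append, List.count_eq_zero_of_not_mem htk]
        simp
      simp [hc1]

-- a fold over range(len(l)) reading l.getD is a fold over l itself
theorem foldl_range_getD {α β : Type} (l : List α) (d : α) (g : β → α → β) (init : β) :
    (List.range l.length).foldl (fun acc i => g acc (l.getD i d)) init = l.foldl g init := by
  rw [← List.foldl_map (f := fun i => l.getD i d) (g := g)]
  congr 1
  apply List.ext_getElem
  · simp
  · intro i h1 h2
    simp only [List.getElem_map, List.getElem_range]
    exact List.getD_eq_getElem _ _ (by simpa using h2)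

-- the word-collecting double loop of return_words
theorem collect_loop (original_list : List String) (sc : List (List Char)) :
    (List.range sc.length).foldl (fun same_words x =>
      (List.range (sort_characters original_list).length).foldl (fun same_words w =>
        if sc.getD x [] = (sort_characters original_list).getD w [] then
          same_words ++ [original_list.getD w ""]
        else same_words) same_words) []
      = sc.flatMap (fun s => original_list.filter (fun word => s = pvSigL word)) := by
  have hlen : (sort_characters original_list).length = original_list.length := by
    simp [sort_characters]
  have hinner : ∀ (s : List Char) (acc : List String),
      (List.range (sort_characters original_list).length).foldl (fun same_words w =>
        if s = (sort_characters original_list).getD w [] then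
          same_words ++ [original_list.getD w ""]
        else same_words) acc
        = acc ++ original_list.filter (fun word => s = pvSigL word) := by
    intro s acc
    rw [hlen]
    have hbody : ∀ (acc : List String) (w : Nat), w ∈ List.range original_list.length →
        (if s = (sort_characters original_list).getD w [] then
          acc ++ [original_list.getD w ""] else acc)
        = (if s = pvSigL (original_list.getD w "") then
          acc ++ [original_list.getD w ""] else acc) := by
      intro acc w hw
      simp only [List.mem_range] at hw
      have hg : (sort_characters original_list).getD w [] = pvSigL (original_list.getD w "") := by
        rw [List.getD_eq_getElem _ _ (by simpa [sort_characters] using hw),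
          List.getD_eq_getElem _ _ hw]
        simp [sort_characters, pvSigL]
      rw [hg]
    rw [PySem.List.foldl_congr_mem (List.range original_list.length)
        (fun acc w =>
          if s = (sort_characters original_list).getD w [] then
            acc ++ [original_list.getD w ""] else acc)
        (fun acc w =>
          if s = pvSigL (original_list.getD w "") then
            acc ++ [original_list.getD w ""] else acc)
        acc hbody,
      foldl_range_getD original_list ""
        (fun acc word => if s = pvSigL word then acc ++ [word] else acc) acc,
      PySem.List.foldl_append_ite_eq_filter]
  rw [foldl_range_getD sc []
    (fun acc s => (List.range (sort_characters original_list).length).foldl (fun same_words w =>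
        if s = (sort_characters original_list).getD w [] then
          same_words ++ [original_list.getD w ""]
        else same_words) acc) []]
  rw [PySem.List.foldl_congr_mem sc
    (fun acc s => (List.range (sort_characters original_list).length).foldl
      (fun same_words w =>
        if s = (sort_characters original_list).getD w [] then
          same_words ++ [original_list.getD w ""]
        else same_words) acc)
    (fun acc s =>
      acc ++ original_list.filter (fun word => decide (s = pvSigL word)))
    [] (fun acc s _ => hinner s acc)]
  rw [PySem.List.foldl_append_eq_flatMap]
  simp

-- A's result in closed form
theorem return_words_eq (l : List String) :
    return_words l
      = ((PySem.Set.ofList (l.map pvSigL)).filter (fun s => 2 ≤ (l.map pvSigL).count s)).flatMap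
          (fun s => l.filter (fun word => s = pvSigL word)) := by
  have h1 : return_words l
      = (List.range (words_with_the_same_characters (sort_characters l)).length).foldl
          (fun same_words x =>
            (List.range (sort_characters l).length).foldl (fun same_words w =>
              if (words_with_the_same_characters (sort_characters l)).getD x []
                  = (sort_characters l).getD w [] then
                same_words ++ [l.getD w ""]
              else same_words) same_words) [] := rfl
  rw [h1, collect_loop l (words_with_the_same_characters (sort_characters l)),
    words_with_the_same_characters_eq]
  rfl

-- Set.ofList commutes with an injective map
theorem set_ofList_map {α β : Type} [BEq α] [LawfulBEq α] [BEq β] [LawfulBEq β] (f : α → β)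
    (hf : Function.Injective f) (xs : List α) :
    PySem.Set.ofList (xs.map f) = (PySem.Set.ofList xs).map f := by
  rw [PySem.Set.ofList_eq_foldl, PySem.Set.ofList_eq_foldl]
  suffices h : ∀ acc : List α, (xs.map f).foldl PySem.Set.add (acc.map f)
      = (xs.foldl PySem.Set.add acc).map f by simpa using h []
  induction xs with
  | nil => simp
  | cons x xs ih =>
    intro acc
    simp only [List.map_cons, List.foldl_cons]
    have hadd : PySem.Set.add (acc.map f) (f x) = (PySem.Set.add acc x).map f := by
      unfold PySem.Set.add PySem.Set.contains
      by_cases hx : x ∈ acc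
      · simp [hx, List.mem_map.2 ⟨x, hx, rfl⟩]
      · have hfx : f x ∉ acc.map f := by
          intro hmem
          obtain ⟨y, hy, hyx⟩ := List.mem_map.1 hmem
          exact hx (hf hyx ▸ hy)
        simp [hx, hfx]
    rw [hadd, ih]

-- B's result in closed form
theorem return_words_alt_eq (l : List String) :
    return_words_alt l
      = (((PySem.Set.ofList (l.map pvSig)).map
            (fun s => l.filter (fun word => pvSig word == s))).filter
          (fun g => 2 ≤ g.length)).flatten := by
  have h1 : return_words_alt l
      = ((PySem.Dict.values (l.foldl (fun groups word =>
            groups.modify (pvSig word) [] (fun g => g ++ [word])) PySem.Dict.empty)).filter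
          (fun group => 2 ≤ group.length)).flatten := rfl
  rw [h1]
  set groups := l.foldl (fun groups word =>
    groups.modify (pvSig word) [] (fun g => g ++ [word])) PySem.Dict.empty with hg
  have hfold : groups
      = (l.map (fun word => ((pvSig word, word) : String × String))).foldl
          (fun d p => d.modify p.1 [] (fun g => g ++ [p.2])) PySem.Dict.empty := by
    rw [hg, List.foldl_map]
  have hnodup : groups.keys.Nodup := by
    rw [hg]
    exact PySem.Dict.nodup_keys_foldl_modify_key l (fun w => pvSig w) []
      (fun d w => fun g => g ++ [w]) PySem.Dict.empty (by simp [pysem])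
  have hkeys : groups.keys = PySem.Set.ofList (l.map pvSig) := by
    rw [hg, PySem.Dict.keys_foldl_modify_key]
    simp [pysem, PySem.Set.update, PySem.Set.ofList_eq_foldl]
  have hget : ∀ s, groups.getD s [] = l.filter (fun word => pvSig word == s) := by
    intro s
    rw [hfold, PySem.Dict.getD_foldl_modify_append, List.filter_map, List.map_map]
    simp [pysem, Function.comp_def]
  rw [PySem.Dict.values_eq_map_keys groups hnodup [], hkeys,
    List.map_congr_left (fun s _ => hget s)]

-- ===== VERDICT (by name: the statement is the Claim_ definition above) =====
set_option maxRecDepth 4096 in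
theorem return_words_spec : Claim_equal_return_words := by
  unfold Claim_equal_return_words Spec_return_words
  intro l _
  rw [return_words_eq, return_words_alt_eq]
  have hinj : Function.Injective String.ofList := by
    intro a b h
    simpa using congrArg String.toList h
  have hsig : l.map pvSig = (l.map pvSigL).map String.ofList := by
    simp [List.map_map, Function.comp_def, pvSig_eq]
  have hG : ∀ s : List Char, l.filter (fun word => pvSig word == String.ofList s)
      = l.filter (fun word => s = pvSigL word) := by
    intro s
    apply List.filter_congr
    intro w _
    by_cases h : s = pvSigL w
    · simp [h, pvSig_eq]
    · have hne : String.ofList (pvSigL w) ≠ String.ofList s := fun hh => h (hinj hh).symm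
      simp [h, pvSig_eq, hne]
  have hcnt : ∀ s : List Char,
      (l.filter (fun word => decide (s = pvSigL word))).length = (l.map pvSigL).count s := by
    intro s
    rw [List.count_eq_countP, List.countP_map, ← List.countP_eq_length_filter]
    apply List.countP_congr
    intro w _
    by_cases h : s = pvSigL w
    · simp [h]
    · have h2 : ¬ pvSigL w = s := fun hh => h hh.symm
      simp [h, h2]
  rw [hsig, set_ofList_map String.ofList hinj]
  rw [List.map_map,
    List.map_congr_left (l := PySem.Set.ofList (l.map pvSigL))
      (f := (fun s => l.filter (fun word => pvSig word == s)) ∘ String.ofList)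
      (g := fun s => l.filter (fun word => s = pvSigL word))
      (fun s _ => hG s)]
  rw [List.filter_map,
    List.filter_congr (l := PySem.Set.ofList (l.map pvSigL))
      (p := (fun g => decide (2 ≤ g.length)) ∘ fun s => l.filter (fun word => s = pvSigL word))
      (q := fun s => decide (2 ≤ (l.map pvSigL).count s))
      (fun s _ => by simp only [Function.comp_def, hcnt s]),
    ← List.flatMap_def]
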